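-- pv_equiv track=rewrite | github.com/FacuGarces/IP-Ex-Algo1- | Python/practica7.py | filas_ordenadas
-- ===== SOURCE A (Python) =====
-- def filas_ordenadas(m:list[list[int]]) -> list[bool]:
--     res: list[bool] = []
--     for lista in m:
--         if ordenada(lista):
--            res.append(True)
--         else:
--             res.append(False)
--     return res
--
-- def ordenada(lista: list[int]) -> bool:
--     for i in range(len(lista)-1):
--         if lista[i] > lista[i+1]:
--             return False
--     else:
--         return True
-- ===== SOURCE B (Python) =====
-- def filas_ordenadas(m: list[list[int]]) -> list[bool]:
--     return [fila == sorted(fila) for fila in m]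
-- ===== Notes on version B (the rewrite author's own statement) =====
-- stated objective: idiomatic
-- what changed: Replaces the adjacent-pair early-exit scan per row with comparing each row to its sorted copy, built as a single comprehension.
import Mathlib
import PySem

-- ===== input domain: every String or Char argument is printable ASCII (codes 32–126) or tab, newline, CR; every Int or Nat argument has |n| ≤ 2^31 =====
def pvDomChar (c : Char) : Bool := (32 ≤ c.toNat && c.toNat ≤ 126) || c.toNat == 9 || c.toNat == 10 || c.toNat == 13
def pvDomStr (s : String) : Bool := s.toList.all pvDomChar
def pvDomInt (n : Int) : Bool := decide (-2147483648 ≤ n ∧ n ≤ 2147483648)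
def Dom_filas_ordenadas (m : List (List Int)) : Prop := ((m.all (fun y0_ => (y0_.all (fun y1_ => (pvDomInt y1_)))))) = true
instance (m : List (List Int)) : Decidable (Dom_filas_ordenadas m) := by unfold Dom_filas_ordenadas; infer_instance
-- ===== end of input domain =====

-- B checks each row against its sorted copy instead of scanning adjacent pairs (idiomatic, same cost class).

-- ===== PORT A =====
-- Python's 'for i in range(len(lista)-1): if lista[i] > lista[i+1]: return False' as an index loop
def ordLoop (lista : List Int) (i : Nat) : Bool :=
  if _h : i + 1 < lista.length then
    if lista[i]! > lista[i+1]! then false else ordLoop lista (i+1)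
  else true
termination_by lista.length - i

def ordenada (lista : List Int) : Bool := ordLoop lista 0

def filas_ordenadas (m : List (List Int)) : List Bool :=
  m.foldl (fun res lista => if ordenada lista then res ++ [true] else res ++ [false]) []

-- ===== PORT B =====
def filas_ordenadas_alt (m : List (List Int)) : List Bool :=
  m.map (fun fila => decide (fila = PySem.List.sorted fila (fun x => x) false))

-- ===== PRECONDITION & SPEC =====
def Spec_filas_ordenadas (m : List (List Int)) (out : List Bool) : Prop := out = filas_ordenadas_alt m
instance (m : List (List Int)) (out : List Bool) : Decidable (Spec_filas_ordenadas m out) := by unfold Spec_filas_ordenadas; infer_instance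

-- ===== CLAIM (what is proved, stated in full; the proofs are below) =====
def Claim_equal_filas_ordenadas : Prop := ∀ (m : List (List Int)), Dom_filas_ordenadas m → Spec_filas_ordenadas m (filas_ordenadas m)

-- ===== LEMMAS AND PROOFS =====

theorem ordLoop_true_iff (lista : List Int) (i : Nat) :
    ordLoop lista i = true ↔ ∀ j, i ≤ j → (h : j + 1 < lista.length) → lista[j] ≤ lista[j+1] := by
  induction i using ordLoop.induct (lista := lista) with
  | case1 i h hgt =>
    rw [ordLoop]; simp only [h, dite_true, hgt, if_true]
    rw [getElem!_pos lista i (by omega), getElem!_pos lista (i+1) h] at hgt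
    constructor
    · intro hf; exact absurd hf (by simp)
    · intro hall; exact absurd (hall i le_rfl h) (by omega)
  | case2 i h hle ih =>
    rw [ordLoop]; simp only [h, dite_true, hle, if_false]
    rw [getElem!_pos lista i (by omega), getElem!_pos lista (i+1) h, not_lt] at hle
    rw [ih]
    constructor
    · intro hall j hij hj
      rcases Nat.eq_or_lt_of_le hij with rfl | hlt
      · exact hle
      · exact hall j hlt hj
    · intro hall j hij hj; exact hall j (Nat.le_of_succ_le hij) hj
  | case3 i h =>
    rw [ordLoop]; simp only [h, dite_false]
    constructor
    · intro _ j hij hj; omega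
    · intro _; simp

theorem adj_pairwise (lista : List Int)
    (hall : ∀ j, (h : j + 1 < lista.length) → lista[j] ≤ lista[j+1]) :
    lista.Pairwise (· ≤ ·) := by
  rw [List.pairwise_iff_getElem]
  have mono : ∀ j (hj : j < lista.length) (i : Nat) (hi : i ≤ j), lista[i]'(by omega) ≤ lista[j] := by
    intro j
    induction j with
    | zero =>
      intro hj i hi
      have hi0 : i = 0 := by omega
      subst hi0; exact le_rfl
    | succ k ih =>
      intro hj i hi
      rcases Nat.eq_or_lt_of_le hi with rfl | hlt
      · exact le_rfl
      · exact le_trans (ih (by omega) i (by omega)) (hall k hj)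
  intro i j hi hj hij
  exact mono j hj i (Nat.le_of_lt hij)

theorem ordenada_eq (lista : List Int) :
    ordenada lista = decide (lista = PySem.List.sorted lista (fun x => x) false) := by
  have h : ordenada lista = true ↔ lista = PySem.List.sorted lista (fun x => x) false := by
    rw [ordenada, ordLoop_true_iff]
    constructor
    · intro hall
      exact (PySem.List.sorted_eq_self_of_pairwise lista (fun x => x)
        (adj_pairwise lista (fun j hj => hall j (Nat.zero_le j) hj))).symm
    · intro heq j _ hj
      have hp : lista.Pairwise (· ≤ ·) := by
        rw [heq]; exact PySem.List.sorted_pairwise lista (fun x => x)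
      exact List.pairwise_iff_getElem.mp hp j (j+1) (by omega) hj (by omega)
  rw [show ordenada lista = decide (ordenada lista = true) by simp]
  exact decide_eq_decide.mpr h

theorem foldl_append_map (m : List (List Int)) (acc : List Bool) (f : List Int → Bool) :
    m.foldl (fun res lista => if f lista then res ++ [true] else res ++ [false]) acc
      = acc ++ m.map f := by
  induction m generalizing acc with
  | nil => simp
  | cons l t ih =>
    simp only [List.foldl_cons, List.map_cons, ih]
    by_cases h : f l <;> simp [h]

-- ===== VERDICT (by name: the statement is the Claim_ definition above) =====
theorem filas_ordenadas_spec : Claim_equal_filas_ordenadas := by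
  intro m _
  show filas_ordenadas m = filas_ordenadas_alt m
  rw [filas_ordenadas, foldl_append_map, List.nil_append, filas_ordenadas_alt]
  exact List.map_congr_left (fun l _ => ordenada_eq l)
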